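-- pv_equiv track=rewrite | github.com/songmho/PostEnhancementforOrganSegmentation | miaas/lirads/software_process/step_6.py | __compute_start_end_ids
-- ===== SOURCE A (Python) =====
-- def __compute_start_end_ids(list_cur_tumor, list_similar_sl_ids, is_current):
--     start = list_cur_tumor[0][0]
--     end = list_cur_tumor[-1][1]
--
--     if is_current: k=0
--     else: k=1
--
--     start_ct_g_id, end_ct_g_id = -1, -1
--     for i in range(len(list_similar_sl_ids)):
--         if start == list_similar_sl_ids[i][k]:
--             start_ct_g_id = i
--         if end == list_similar_sl_ids[i][k]:
--             end_ct_g_id = i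
--
--     return (start_ct_g_id, end_ct_g_id)
-- ===== SOURCE B (Python) =====
-- def __compute_start_end_ids(list_cur_tumor, list_similar_sl_ids, is_current):
--     start = list_cur_tumor[0][0]
--     end = list_cur_tumor[-1][1]
--     k = 0 if is_current else 1
--     n = len(list_similar_sl_ids)
--
--     def last_index(v):
--         # scan from the back; the first hit is the last occurrence
--         for j, row in enumerate(reversed(list_similar_sl_ids)):
--             if row[k] == v:
--                 return n - 1 - j
--         return -1
--
--     return (last_index(start), last_index(end))
-- ===== Notes on version B (the rewrite author's own statement) =====
-- stated objective: alternative
-- what changed: Replaces the single forward pass that keeps updating two running last-match indices by two independent backward scans with early exit: the first match from the end of the reversed list is the last occurrence.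
import Mathlib
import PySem

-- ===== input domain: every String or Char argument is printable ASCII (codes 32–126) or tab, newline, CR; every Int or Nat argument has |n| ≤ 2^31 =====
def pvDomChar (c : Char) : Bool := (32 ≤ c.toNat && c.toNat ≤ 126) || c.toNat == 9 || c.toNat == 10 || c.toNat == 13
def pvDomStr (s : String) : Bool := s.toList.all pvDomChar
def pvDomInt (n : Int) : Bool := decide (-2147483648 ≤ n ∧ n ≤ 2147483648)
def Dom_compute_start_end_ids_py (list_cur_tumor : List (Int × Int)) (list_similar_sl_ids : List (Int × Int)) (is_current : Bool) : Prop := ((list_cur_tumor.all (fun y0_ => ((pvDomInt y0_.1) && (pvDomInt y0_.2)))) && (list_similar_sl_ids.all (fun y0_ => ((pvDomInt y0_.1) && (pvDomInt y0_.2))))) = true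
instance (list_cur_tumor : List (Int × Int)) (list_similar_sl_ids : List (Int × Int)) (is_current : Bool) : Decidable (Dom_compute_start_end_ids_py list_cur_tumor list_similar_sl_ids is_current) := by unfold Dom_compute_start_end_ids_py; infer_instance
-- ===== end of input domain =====

-- ===== PORT A =====
-- B replaces A's single forward pass with two backward early-exit scans; neither
-- mutates its arguments. list_similar_sl_ids[i][k] is ported with pyGetD (i always
-- in range) and tuple indexing by k as 'if k = 0 then .1 else .2'.
def compute_start_end_ids_py (list_cur_tumor : List (Int × Int)) (list_similar_sl_ids : List (Int × Int)) (is_current : Bool) : Int × Int :=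
  let start := (PySem.List.pyGetD list_cur_tumor 0 ((0:Int),(0:Int))).1
  let fin := (PySem.List.pyGetD list_cur_tumor (-1) ((0:Int),(0:Int))).2
  let k : Int := if is_current then 0 else 1
  (PySem.List.pyRange 0 (list_similar_sl_ids.length : Int) 1).foldl
    (fun (st : Int × Int) i =>
      let row := PySem.List.pyGetD list_similar_sl_ids i ((0:Int),(0:Int))
      let v := if k = 0 then row.1 else row.2
      (if start = v then i else st.1, if fin = v then i else st.2))
    (-1, -1)

-- ===== PORT B =====
-- last_index: walk the reversed list with counter j; the first hit at position j
-- from the back is the last occurrence, at index n - 1 - j; -1 if no hit.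
def pvLastIdxRev (k v n j : Int) : List (Int × Int) → Int
  | [] => -1
  | r :: rs => if (if k = 0 then r.1 else r.2) = v then n - 1 - j else pvLastIdxRev k v n (j + 1) rs

def compute_start_end_ids_py_alt (list_cur_tumor : List (Int × Int)) (list_similar_sl_ids : List (Int × Int)) (is_current : Bool) : Int × Int :=
  let start := (PySem.List.pyGetD list_cur_tumor 0 ((0:Int),(0:Int))).1
  let fin := (PySem.List.pyGetD list_cur_tumor (-1) ((0:Int),(0:Int))).2
  let k : Int := if is_current then 0 else 1
  let n : Int := (list_similar_sl_ids.length : Int)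
  let rev := list_similar_sl_ids.reverse
  (pvLastIdxRev k start n 0 rev, pvLastIdxRev k fin n 0 rev)

-- ===== PRECONDITION & SPEC =====
-- Pre_ excludes only empty list_cur_tumor, on which Python A raises IndexError.
def Pre_compute_start_end_ids_py (list_cur_tumor : List (Int × Int)) (list_similar_sl_ids : List (Int × Int)) (is_current : Bool) : Prop := list_cur_tumor ≠ []
instance (list_cur_tumor : List (Int × Int)) (list_similar_sl_ids : List (Int × Int)) (is_current : Bool) : Decidable (Pre_compute_start_end_ids_py list_cur_tumor list_similar_sl_ids is_current) := by unfold Pre_compute_start_end_ids_py; infer_instance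
def pvWitness_compute_start_end_ids_py : (List (Int × Int)) × (List (Int × Int)) × Bool := ([(1, 2)], [(1, 3), (2, 2)], true)
def Spec_compute_start_end_ids_py (list_cur_tumor : List (Int × Int)) (list_similar_sl_ids : List (Int × Int)) (is_current : Bool) (out : Int × Int) : Prop := out = compute_start_end_ids_py_alt list_cur_tumor list_similar_sl_ids is_current
instance (list_cur_tumor : List (Int × Int)) (list_similar_sl_ids : List (Int × Int)) (is_current : Bool) (out : Int × Int) : Decidable (Spec_compute_start_end_ids_py list_cur_tumor list_similar_sl_ids is_current out) := by unfold Spec_compute_start_end_ids_py; infer_instance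

-- ===== CLAIM =====
def Claim_equal_compute_start_end_ids_py : Prop := ∀ (list_cur_tumor : List (Int × Int)) (list_similar_sl_ids : List (Int × Int)) (is_current : Bool), Dom_compute_start_end_ids_py list_cur_tumor list_similar_sl_ids is_current → Pre_compute_start_end_ids_py list_cur_tumor list_similar_sl_ids is_current → Spec_compute_start_end_ids_py list_cur_tumor list_similar_sl_ids is_current (compute_start_end_ids_py list_cur_tumor list_similar_sl_ids is_current)

-- ===== LEMMAS AND PROOFS =====

-- The backward scan depends only on n - j.
lemma pvLastIdxRev_shift (k v : Int) : ∀ (l : List (Int × Int)) (n j : Int),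
    pvLastIdxRev k v (n + 1) (j + 1) l = pvLastIdxRev k v n j l := by
  intro l
  induction l with
  | nil => intro n j; rfl
  | cons r rs ih =>
    intro n j
    simp only [pvLastIdxRev]
    by_cases h : (if k = 0 then r.1 else r.2) = v
    · simp [h]; ring
    · simp [h, ih]

-- A's twin running-match fold over the enumerated list equals the two backward scans.
lemma fold_eq_rev (k s e : Int) : ∀ (ls : List (Int × Int)),
    (PySem.List.enumerate ls 0).foldl
      (fun (st : Int × Int) p =>
        (if s = (if k = 0 then p.2.1 else p.2.2) then p.1 else st.1,
         if e = (if k = 0 then p.2.1 else p.2.2) then p.1 else st.2))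
      (-1, -1)
    = (pvLastIdxRev k s (ls.length : Int) 0 ls.reverse,
       pvLastIdxRev k e (ls.length : Int) 0 ls.reverse) := by
  intro ls
  induction ls using List.reverseRecOn with
  | nil => rfl
  | append_singleton ls r ih =>
    rw [PySem.List.enumerate_append, List.foldl_append, ih]
    simp only [PySem.List.enumerate_cons, PySem.List.enumerate_nil, List.foldl_cons,
      List.foldl_nil, List.reverse_append, List.reverse_singleton, List.singleton_append,
      List.length_append, List.length_singleton, pvLastIdxRev]
    push_cast
    have hshift : ∀ v, pvLastIdxRev k v ((ls.length : Int) + 1) 1 ls.reverse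
        = pvLastIdxRev k v (ls.length : Int) 0 ls.reverse := by
      intro v
      have h := pvLastIdxRev_shift k v ls.reverse (ls.length : Int) 0
      simpa using h
    rw [Prod.mk.injEq]
    constructor <;>
    · by_cases hs : s = (if k = 0 then r.1 else r.2) <;>
      by_cases he : e = (if k = 0 then r.1 else r.2) <;>
      simp [hs, he, eq_comm, hshift]

-- ===== VERDICT =====
theorem compute_start_end_ids_py_spec : Claim_equal_compute_start_end_ids_py := by
  intro lct ls c _ _
  unfold Spec_compute_start_end_ids_py compute_start_end_ids_py compute_start_end_ids_py_alt
  have henum := PySem.List.enumerate_eq_map_pyRange ls ((0:Int),(0:Int))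
  have h := fold_eq_rev (if c then (0:Int) else 1)
      ((PySem.List.pyGetD lct 0 ((0:Int),(0:Int))).1)
      ((PySem.List.pyGetD lct (-1) ((0:Int),(0:Int))).2) ls
  simp only [henum, List.foldl_map] at h
  simpa using h
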